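-- pv_equiv track=rewrite | github.com/Afraz-M/cp-notebook | searching/buyk.py | solve_bincatmod
-- ===== SOURCE A (Python) =====
-- MOD = 998244353
--
-- def mod_exp(base, exp, mod):
--     result = 1
--     while exp > 0:
--         if exp % 2 == 1:
--             result = (result * base) % mod
--         base = (base * base) % mod
--         exp //= 2
--     return result
--
-- def solve_bincatmod(t, queries):
--     results = []
--     for n in queries:
--         result = 0
--         length = 1
--         current = 1
--
--         while current <= n:
--             # Range of numbers with binary length 'length'
--             next_current = min(n + 1, 1 << length)
--             count = next_current - current
--
--             # Contribution of this range
--             power = mod_exp(2, length, MOD)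
--             result = (result * mod_exp(power, count, MOD) + sum(range(current, next_current))) % MOD
--
--             current = next_current
--             length += 1
--
--         results.append(result)
--     return results
-- ===== SOURCE B (Python) =====
-- MOD = 998244353
--
-- def solve_bincatmod(t, queries):
--     # Same results as the range-summing version, but each binary-length block is
--     # folded in with a closed-form arithmetic series and one built-in modular pow.
--     results = []
--     for n in queries:
--         acc = 0
--         if n > 0:
--             for length in range(1, n.bit_length() + 1):
--                 lo = 1 << (length - 1)
--                 hi = min(n + 1, 1 << length)
--                 cnt = hi - lo
--                 acc = (acc * pow(2, length * cnt, MOD) + (lo + hi - 1) * cnt // 2) % MOD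
--         results.append(acc)
--     return results
-- ===== Notes on version B (the rewrite author's own statement) =====
-- stated objective: faster
-- what changed: Each binary-length block is folded in with the closed-form arithmetic series (lo+hi-1)*cnt//2 instead of sum(range(lo,hi)), and the two chained hand-rolled mod_exp calls are replaced by one built-in three-argument pow with the combined exponent length*cnt; the per-length loop runs over range(1, n.bit_length()+1) instead of a while loop on current.
import Mathlib
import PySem

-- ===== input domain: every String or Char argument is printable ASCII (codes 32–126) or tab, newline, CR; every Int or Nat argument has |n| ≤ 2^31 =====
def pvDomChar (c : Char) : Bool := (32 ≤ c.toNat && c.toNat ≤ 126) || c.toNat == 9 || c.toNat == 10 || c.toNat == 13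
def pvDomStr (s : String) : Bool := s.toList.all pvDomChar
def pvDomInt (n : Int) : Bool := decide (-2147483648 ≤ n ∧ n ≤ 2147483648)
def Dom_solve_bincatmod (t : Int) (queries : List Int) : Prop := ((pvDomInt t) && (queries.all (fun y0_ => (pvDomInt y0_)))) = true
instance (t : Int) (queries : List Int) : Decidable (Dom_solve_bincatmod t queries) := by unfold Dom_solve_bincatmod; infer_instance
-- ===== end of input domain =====

-- B replaces A's per-block sum(range(a,b)) by the closed-form arithmetic series and the
-- hand-rolled double mod_exp by one built-in pow with a combined exponent (objective: faster).

-- ===== PORT A =====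
def pvMOD : Int := 998244353

-- while exp > 0: … of A's mod_exp; fuel only makes the halving loop total, one unit per iteration
def mod_exp_go (base exp mod result : Int) : Nat → Int
  | 0 => result
  | f + 1 =>
    if exp > 0 then
      mod_exp_go (PySem.Int.mod (base * base) mod) (PySem.Int.floordiv exp 2) mod
        (if PySem.Int.mod exp 2 = 1 then PySem.Int.mod (result * base) mod else result) f
    else result

def mod_exp (base exp mod : Int) : Int := mod_exp_go base exp mod 1 (exp.toNat + 1)

-- the while-loop body of A; fuel (n+2).toNat suffices since `current` strictly increases
-- towards n+1; `1 << length` is (1 <<< length.toNat): length ≥ 1 in every reachable call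
def solveA_go (n : Int) (result length current : Int) : Nat → Int
  | 0 => result
  | f + 1 =>
    if current ≤ n then
      let next_current := min (n + 1) ((1 : Int) <<< (length.toNat : Nat))
      let count := next_current - current
      let power := mod_exp 2 length pvMOD
      let result' := PySem.Int.mod
        (result * mod_exp power count pvMOD + (PySem.List.pyRange current next_current 1).sum) pvMOD
      solveA_go n result' (length + 1) next_current f
    else result

def solve_bincatmod (t : Int) (queries : List Int) : List Int :=
  queries.foldl (fun results n => results ++ [solveA_go n 0 1 1 ((n + 2).toNat)]) []

-- ===== PORT B =====
-- one query of Source B: for length in range(1, max(n,0).bit_length()+1) with the closed-form series;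
-- pow(2, length*cnt, MOD) is PySem.Int.powMod (exponent ≥ 0 in every reachable call, so .toNat is exact)
def solveB_one (n : Int) : Int :=
  if 0 < n then
  (PySem.List.pyRange 1 ((PySem.Int.bitLength n : Int) + 1) 1).foldl
    (fun acc length =>
      let lo : Int := (1 : Int) <<< ((length - 1).toNat : Nat)
      let hi : Int := min (n + 1) ((1 : Int) <<< (length.toNat : Nat))
      let cnt := hi - lo
      PySem.Int.mod
        (acc * PySem.Int.powMod 2 ((length * cnt).toNat) pvMOD
          + PySem.Int.floordiv ((lo + hi - 1) * cnt) 2) pvMOD) 0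
  else 0

def solve_bincatmod_alt (t : Int) (queries : List Int) : List Int :=
  queries.foldl (fun results n => results ++ [solveB_one n]) []

-- ===== PRECONDITION & SPEC =====
def Spec_solve_bincatmod (t : Int) (queries : List Int) (out : List Int) : Prop := out = solve_bincatmod_alt t queries
instance (t : Int) (queries : List Int) (out : List Int) : Decidable (Spec_solve_bincatmod t queries out) := by unfold Spec_solve_bincatmod; infer_instance

-- ===== CLAIM (what is proved, stated in full; the proofs are below) =====
def Claim_equal_solve_bincatmod : Prop := ∀ (t : Int) (queries : List Int), Dom_solve_bincatmod t queries → Spec_solve_bincatmod t queries (solve_bincatmod t queries)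

-- ===== LEMMAS AND PROOFS =====

-- (1 << k) as a power of two, in the exact shapes the ports produce
theorem shl_one (i : Int) : (1 : Int) <<< (i.toNat : Nat) = 2 ^ i.toNat := by
  rw [Int.shiftLeft_eq, one_mul]

theorem shl_one_nat (k : Nat) : (1 : Int) <<< k = 2 ^ k := by
  rw [Int.shiftLeft_eq, one_mul]

theorem pow_emod_base (x m : Int) (j : Nat) : (x % m) ^ j % m = x ^ j % m :=
  (Int.ModEq.pow j (Int.emod_emod_of_dvd x dvd_rfl)).symm ▸ rfl

theorem hMpos : (0 : Int) < pvMOD := by norm_num [pvMOD]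

-- A's mod_exp loop computes a modular power (stated on a cast Nat exponent)
theorem mod_exp_go_eq (m : Int) (hm : 0 < m) :
    ∀ (fuel k : Nat) (b r : Int), k < fuel →
      mod_exp_go b (k : Int) m r fuel = if k = 0 then r else PySem.Int.mod (r * b ^ k) m := by
  intro fuel
  induction fuel with
  | zero => intro k b r h; omega
  | succ f ih =>
    intro k b r h
    by_cases hk : k = 0
    · subst hk; simp [mod_exp_go]
    · have hkpos : (0 : Int) < (k : Int) := by exact_mod_cast Nat.pos_of_ne_zero hk
      simp only [mod_exp_go, if_pos hkpos, if_neg hk]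
      have hfd : PySem.Int.floordiv (k : Int) 2 = ((k / 2 : Nat) : Int) := by
        exact_mod_cast PySem.Int.floordiv_natCast k 2
      have hmd : PySem.Int.mod (k : Int) 2 = ((k % 2 : Nat) : Int) := by
        exact_mod_cast PySem.Int.mod_natCast k 2
      rw [hfd, hmd, ih (k / 2) _ _ (by omega)]
      simp only [PySem.Int.mod_eq_emod_of_pos hm]
      obtain ⟨q, j, hj, hkeq⟩ : ∃ q j, (j = 0 ∨ j = 1) ∧ k = 2 * q + j :=
        ⟨k / 2, k % 2, Nat.mod_two_eq_zero_or_one k, by omega⟩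
      have hq2 : k / 2 = q := by omega
      have hj2 : k % 2 = j := by omega
      rw [hq2, hj2]
      by_cases h2 : q = 0
      · have : j = 1 := by omega
        subst this; subst h2
        have : k = 1 := by omega
        subst this
        norm_num
      · have hqpow : ((b * b) % m) ^ q % m = b ^ (2 * q) % m := by
          rw [pow_emod_base, pow_mul, sq]
        rcases hj with h0 | h1
        · subst h0
          simp only [Nat.cast_zero, if_neg (by norm_num : ¬ (0 : Int) = 1), if_neg h2]
          rw [Int.mul_emod r, hqpow, ← Int.mul_emod, hkeq]
          norm_num
        · subst h1
          simp only [Nat.cast_one, ite_true, if_neg h2]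
          rw [Int.mul_emod _ (((b*b) % m) ^ q), hqpow, Int.emod_emod_of_dvd _ dvd_rfl,
              ← Int.mul_emod, hkeq, pow_add, pow_mul, sq, pow_one]
          ring_nf

theorem mod_exp_cast (k : Nat) (b : Int) (hk : 1 ≤ k) :
    mod_exp b (k : Int) pvMOD = (b ^ k) % pvMOD := by
  unfold mod_exp
  rw [Int.toNat_natCast, mod_exp_go_eq pvMOD hMpos (k + 1) k b 1 (by omega),
      if_neg (by omega), PySem.Int.mod_eq_emod_of_pos hMpos, one_mul]

-- Gauss: twice the sum of range(a, a+d) is (2a+d-1)*d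
theorem sum_pyRange_gauss : ∀ (d : Nat) (a : Int),
    2 * (PySem.List.pyRange a (a + (d : Int)) 1).sum = (a + (a + d) - 1) * d := by
  intro d
  induction d with
  | zero => intro a; simp [PySem.List.pyRange_one_eq_nil]
  | succ d ih =>
    intro a
    have h : (a : Int) ≤ a + d := by omega
    rw [show (a + ((d + 1 : Nat) : Int)) = (a + d) + 1 by push_cast; ring,
        PySem.List.pyRange_one_succ_right h]
    simp only [List.sum_append, List.sum_cons, List.sum_nil]
    have := ih a
    push_cast
    push_cast at this
    nlinarith [this]

-- A's while loop, started at binary length l with current = min(n+1, 2^(l-1)),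
-- equals B's fold over the remaining binary lengths l..bit_length(n)
theorem loop_eq (n : Int) (hn : 1 ≤ n) :
    ∀ (fuel l : Nat) (r : Int), 1 ≤ l →
      (n + 1 - min (n + 1) ((2 : Int) ^ (l - 1))).toNat < fuel →
      solveA_go n r (l : Int) (min (n + 1) ((2 : Int) ^ (l - 1))) fuel
        = (PySem.List.pyRange (l : Int) ((PySem.Int.bitLength n : Int) + 1) 1).foldl
            (fun acc length =>
              let lo : Int := (1 : Int) <<< ((length - 1).toNat : Nat)
              let hi : Int := min (n + 1) ((1 : Int) <<< (length.toNat : Nat))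
              let cnt := hi - lo
              PySem.Int.mod
                (acc * PySem.Int.powMod 2 ((length * cnt).toNat) pvMOD
                  + PySem.Int.floordiv ((lo + hi - 1) * cnt) 2) pvMOD) r := by
  simp only [shl_one]
  set L := PySem.Int.bitLength n with hLdef
  have hL1 : n < 2 ^ L := by
    have := PySem.Int.lt_two_pow_bitLength n
    have h2 : ((n.natAbs : Int)) = n := by omega
    calc n = (n.natAbs : Int) := h2.symm
    _ < ((2 ^ L : Nat) : Int) := by exact_mod_cast this
    _ = 2 ^ L := by push_cast; ring
  have hL2 : (2:Int) ^ (L - 1) ≤ n := by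
    have := PySem.Int.two_pow_bitLength_le n (by omega)
    have h2 : ((n.natAbs : Int)) = n := by omega
    calc (2:Int) ^ (L-1) = ((2 ^ (L-1) : Nat) : Int) := by push_cast; ring
    _ ≤ (n.natAbs : Int) := by exact_mod_cast this
    _ = n := h2
  intro fuel
  induction fuel with
  | zero => intro l r _ hf; omega
  | succ f ih =>
    intro l r hl hf
    set c : Int := min (n + 1) ((2 : Int) ^ (l - 1)) with hcdef
    simp only [solveA_go]
    by_cases hc : c ≤ n
    · -- loop body runs; c = 2^(l-1) and l ≤ L
      have hpowle : (2:Int) ^ (l - 1) ≤ n := by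
        by_contra hgt
        push_neg at hgt
        have : c = n + 1 := by omega
        omega
      have hceq : c = (2:Int) ^ (l - 1) := by omega
      have hlL : l ≤ L := by
        by_contra hgt
        push_neg at hgt
        have : (2:Int) ^ L ≤ 2 ^ (l - 1) :=
          pow_le_pow_right₀ (by norm_num) (by omega)
        omega
      have hpow2 : (2:Int) ^ l = 2 ^ (l - 1) * 2 := by
        rw [← pow_succ]; congr 1; omega
      have hcpos : (1:Int) ≤ c := by
        have : (1:Int) ≤ 2 ^ (l-1) := one_le_pow₀ (by norm_num)
        omega
      -- the head of the range
      rw [PySem.List.pyRange_one_cons (by omega : (l:Int) < (L:Int) + 1)]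
      rw [List.foldl_cons]
      rw [if_pos hc]
      -- identify the pieces
      have hl1 : ((l : Int) - 1).toNat = l - 1 := by omega
      simp only [Int.toNat_natCast, hl1, shl_one_nat]
      set next : Int := min (n + 1) ((2:Int) ^ l) with hnextdef
      have hnext_gt : c < next := by omega
      have hnext_le : next ≤ n + 1 := by omega
      set cnt : Int := next - c with hcntdef
      obtain ⟨cn, hcn, hcn1⟩ : ∃ cn : Nat, cnt = (cn : Int) ∧ 1 ≤ cn :=
        ⟨cnt.toNat, by omega, by omega⟩
      -- mod_exp (mod_exp 2 l M) cnt M = powMod 2 (l*cnt).toNat M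
      have hme : mod_exp (mod_exp 2 (l : Int) pvMOD) cnt pvMOD
          = PySem.Int.powMod 2 (((l : Int) * cnt).toNat) pvMOD := by
        rw [mod_exp_cast l 2 (by omega), hcn, mod_exp_cast cn _ (by omega),
            pow_emod_base, ← pow_mul,
            show ((l : Int) * (cn : Int)) = ((l * cn : Nat) : Int) by push_cast; ring,
            Int.toNat_natCast, PySem.Int.powMod_eq, PySem.Int.mod_eq_emod_of_pos hMpos]
      -- sum = closed form
      have hsum : (PySem.List.pyRange c next 1).sum
          = PySem.Int.floordiv ((c + next - 1) * cnt) 2 := by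
        have hg := sum_pyRange_gauss cn c
        rw [show c + (cn : Int) = next by omega] at hg
        rw [hcn, eq_comm, PySem.Int.floordiv_eq_iff_of_pos (by norm_num)]
        omega
      rw [hme, hsum]
      -- recurse
      have hnext_inv : next = min (n + 1) ((2:Int) ^ ((l + 1) - 1)) := by
        simp only [Nat.add_sub_cancel, hnextdef]
      have := ih (l + 1)
        (PySem.Int.mod (r * PySem.Int.powMod 2 (((l:Int) * cnt).toNat) pvMOD
          + PySem.Int.floordiv ((c + next - 1) * cnt) 2) pvMOD) (by omega)
        (by rw [← hnext_inv]; omega)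
      rw [← hnext_inv] at this
      rw [show ((l : Int) + 1) = ((l + 1 : Nat) : Int) by push_cast; ring, this]
      congr 2
      rw [← hceq, ← hcntdef]
    · -- loop exits; range is empty
      rw [if_neg hc]
      have hgt : n < (2:Int) ^ (l - 1) := by omega
      have hLl : L < l := by
        by_contra hle
        push_neg at hle
        have : (2:Int) ^ (l - 1) ≤ 2 ^ (L - 1) :=
          pow_le_pow_right₀ (by norm_num) (by omega)
        omega
      rw [PySem.List.pyRange_one_eq_nil (by omega : ((L:Int) + 1) ≤ (l:Int))]
      rfl

theorem one_query_eq (n : Int) : solveA_go n 0 1 1 ((n + 2).toNat) = solveB_one n := by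
  by_cases hn : 1 ≤ n
  · have h := loop_eq n hn ((n + 2).toNat) 1 0 (le_refl 1)
      (by simp only [Nat.sub_self, pow_zero]; omega)
    simp only [Nat.cast_one, Nat.sub_self, pow_zero] at h
    rw [show min (n + 1) (1 : Int) = 1 by omega] at h
    rw [h]
    unfold solveB_one
    rw [if_pos (show (0:Int) < n by omega)]
  · unfold solveB_one
    rw [if_neg (by omega : ¬ (0:Int) < n)]
    cases h : (n + 2).toNat with
    | zero => rfl
    | succ f => simp only [solveA_go]; rw [if_neg (by omega)]

-- ===== VERDICT (by name: the statement is the Claim_ definition above) =====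
theorem solve_bincatmod_spec : Claim_equal_solve_bincatmod := by
  intro t queries _
  unfold Spec_solve_bincatmod solve_bincatmod solve_bincatmod_alt
  simp only [one_query_eq]
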